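-- pv_equiv track=rewrite | github.com/mikeknapp/candy-machine | server/tags.py | common_suffixes
-- ===== SOURCE A (Python) =====
-- def common_suffixes(tags: dict[str, int]) -> dict[str, int]:
--     # Build a list of common suffixes.
--     # These can be a single word or multiple words. Therefore, we need to look at ngrams.
--     # Example 1: "red head scarf", "blue head scarf", "yellow head scarf" -> "head scarf"
--     # Example 2: "wide angle", "closeup angle" -> "angle"
--
--     suffixes = {}
--     for tag in tags.keys():
--         words = tag.split(" ")
--         for i in range(1, len(words)):
--             suffix = " ".join(words[i:])
--             suffixes[suffix] = suffixes.get(suffix, 0) + 1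
--
--     # If a suffix is already contained in a longer suffix, remove it.
--     suffixes_copy = suffixes.copy()
--     for suffix, s_count in suffixes_copy.items():
--         for other_suffix, os_count in suffixes_copy.items():
--             if (
--                 len(suffix) < len(other_suffix)
--                 and suffix in other_suffix
--                 and s_count <= os_count
--             ):
--                 del suffixes[suffix]
--                 break
--
--     # Remove any that have count < 2
--     suffixes = {k: v for k, v in suffixes.items() if v >= 2}
--
--     return suffixes
-- ===== SOURCE B (Python) =====
-- def common_suffixes(tags: dict[str, int]) -> dict[str, int]:
--     # Count word-suffixes by building each tag's suffixes incrementally from the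
--     # right (string concatenation instead of repeated join-of-slice); then prune
--     # with a single length-descending sweep: each suffix is tested only against
--     # the strictly longer suffixes already seen, instead of A's full pairwise
--     # delete-from-a-copy scan.
--     counts = {}
--     for tag in tags:
--         words = tag.split(" ")
--         if len(words) > 1:
--             acc = words[-1]
--             sufs = [acc]
--             for w in reversed(words[1:-1]):
--                 acc = w + " " + acc
--                 sufs.append(acc)
--             for s in reversed(sufs):
--                 counts[s] = counts.get(s, 0) + 1
--     keep = set()
--     seen = []
--     for s, c in sorted(counts.items(), key=lambda kv: -len(kv[0])):
--         if c >= 2 and not any(len(s) < len(o) and s in o and c <= oc for o, oc in seen):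
--             keep.add(s)
--         seen.append((s, c))
--     return {s: c for s, c in counts.items() if s in keep}
-- ===== Notes on version B (the rewrite author's own statement) =====
-- stated objective: alternative
-- what changed: Counting builds each tag's suffixes incrementally right-to-left by string concatenation instead of join-of-slice per index, and the dominance pruning is replaced by a length-descending sort plus a single sweep with a seen-accumulator (each suffix is tested only against already-seen strictly longer ones, with the count>=2 filter folded into the sweep that builds a keep-set), instead of A's delete-from-a-copy full pairwise scan.
import Mathlib
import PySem

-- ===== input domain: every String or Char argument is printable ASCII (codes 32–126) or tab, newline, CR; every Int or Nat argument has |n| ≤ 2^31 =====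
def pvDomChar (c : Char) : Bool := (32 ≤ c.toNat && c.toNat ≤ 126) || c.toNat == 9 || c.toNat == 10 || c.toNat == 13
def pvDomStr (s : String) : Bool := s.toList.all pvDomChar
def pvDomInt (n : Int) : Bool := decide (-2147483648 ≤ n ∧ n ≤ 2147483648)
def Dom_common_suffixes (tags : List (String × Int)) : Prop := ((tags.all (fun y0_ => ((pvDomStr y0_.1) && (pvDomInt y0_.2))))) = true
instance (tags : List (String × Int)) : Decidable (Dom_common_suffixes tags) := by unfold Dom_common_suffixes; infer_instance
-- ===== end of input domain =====

-- B counts each tag's suffixes by an incremental right-to-left concatenation and replaces A's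
-- pairwise delete-from-a-copy dominance scan by a length-descending sort plus one sweep with a
-- seen-accumulator; same results, alternative algorithm.

-- ===== PORT A =====
-- inner 'for other_suffix, os_count in suffixes_copy.items(): … del …; break' loop of A
def innerA (s : String) (sc : Int) (d : PySem.Dict String Int) :
    List (String × Int) → PySem.Dict String Int
  | [] => d
  | (o, oc) :: rest =>
    if decide (PySem.Str.len s < PySem.Str.len o) && PySem.Str.isIn s o && decide (sc ≤ oc) then
      d.erase s
    else innerA s sc d rest

def common_suffixes (tags : List (String × Int)) : List (String × Int) :=
  -- 'for tag in tags.keys()': the dict's keys are the first occurrences, in order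
  let suffixes := (PySem.List.dedup (tags.map Prod.fst)).foldl (fun d tag =>
      let words := (PySem.Str.split? tag " ").getD []   -- sep " " ≠ "", so split? is always some
      (PySem.List.pyRange 1 (words.length) 1).foldl (fun d i =>
          let suffix := PySem.Str.join " " (PySem.List.slice words (some i) none)
          d.insert suffix (d.getD suffix 0 + 1)) d)
    PySem.Dict.empty
  let copyItems := suffixes.items
  let final := copyItems.foldl (fun d kv => innerA kv.1 kv.2 d copyItems) suffixes
  final.items.filter (fun kv => decide ((2 : Int) ≤ kv.2))

-- ===== PORT B =====
-- 'any(len(s) < len(o) and s in o and c <= oc for o, oc in seen)'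
def dominatedB (items : List (String × Int)) (kv : String × Int) : Bool :=
  items.any (fun ov =>
    decide (PySem.Str.len kv.1 < PySem.Str.len ov.1) && PySem.Str.isIn kv.1 ov.1 &&
      decide (kv.2 ≤ ov.2))

-- per-tag counting: acc = words[-1]; sufs = [acc]; for w in reversed(words[1:-1]): acc = w+" "+acc;
-- sufs.append(acc); then 'for s in reversed(sufs): counts[s] = counts.get(s, 0) + 1'
def countTagB (d : PySem.Dict String Int) (tag : String) : PySem.Dict String Int :=
  let words := (PySem.Str.split? tag " ").getD []   -- sep " " ≠ "", so split? is always some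
  if 1 < words.length then
    let last := (PySem.List.pyGet? words (-1)).getD ""   -- in range: words ≠ [] here
    let st := ((PySem.List.slice words (some 1) (some (-1))).reverse).foldl
        (fun (p : String × List String) w => (w ++ " " ++ p.1, p.2 ++ [w ++ " " ++ p.1]))
        (last, [last])
    st.2.reverse.foldl (fun d s => d.insert s (d.getD s 0 + 1)) d
  else d

def common_suffixes_alt (tags : List (String × Int)) : List (String × Int) :=
  let counts := (PySem.List.dedup (tags.map Prod.fst)).foldl countTagB PySem.Dict.empty
  -- keep = set(); seen = []; for s, c in sorted(counts.items(), key=lambda kv: -len(kv[0])): …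
  let st := (PySem.List.sorted counts.items (fun kv => -(PySem.Str.len kv.1 : Int)) false).foldl
      (fun (st : PySem.Set String × List (String × Int)) kv =>
        (if decide ((2 : Int) ≤ kv.2) && !dominatedB st.2 kv then PySem.Set.add st.1 kv.1
         else st.1,
         st.2 ++ [kv]))
      (PySem.Set.empty, [])
  counts.items.filter (fun kv => PySem.Set.contains st.1 kv.1)

-- ===== PRECONDITION & SPEC =====
def Spec_common_suffixes (tags : List (String × Int)) (out : List (String × Int)) : Prop := out = common_suffixes_alt tags
instance (tags : List (String × Int)) (out : List (String × Int)) : Decidable (Spec_common_suffixes tags out) := by unfold Spec_common_suffixes; infer_instance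

-- ===== CLAIM (what is proved, stated in full; the proofs are below) =====
def Claim_equal_common_suffixes : Prop := ∀ (tags : List (String × Int)), Dom_common_suffixes tags → Spec_common_suffixes tags (common_suffixes tags)

-- ===== LEMMAS AND PROOFS =====

theorem join_singleton' (a : String) : PySem.Str.join " " [a] = a := by
  apply String.toList_inj.mp
  simp [PySem.Str.toList_join, PySem.Chars.join_singleton]

theorem join_cons (a : String) (l : List String) (h : l ≠ []) :
    PySem.Str.join " " (a :: l) = a ++ " " ++ PySem.Str.join " " l := by
  apply String.toList_inj.mp
  obtain ⟨b, l', rfl⟩ := List.exists_cons_of_ne_nil h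
  simp [PySem.Str.toList_join, PySem.Chars.join_cons_cons, String.toList_append]

theorem foldB (t : List String) (ht : t ≠ []) :
    (t.dropLast.reverse).foldl
      (fun (p : String × List String) w => (w ++ " " ++ p.1, p.2 ++ [w ++ " " ++ p.1]))
      (t.getLast?.getD "", [t.getLast?.getD ""])
    = (PySem.Str.join " " t,
       ((List.range t.length).map (fun j => PySem.Str.join " " (t.drop j))).reverse) := by
  induction t with
  | nil => exact absurd rfl ht
  | cons x t' ih =>
    cases t' with
    | nil => simp [join_singleton']
    | cons y t'' =>
      have ht' : (y :: t'') ≠ [] := by simp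
      rw [List.dropLast_cons₂, List.reverse_cons, List.foldl_append, List.getLast?_cons_cons,
        ih ht']
      simp only [List.foldl_cons, List.foldl_nil]
      rw [Prod.mk.injEq]
      constructor
      · rw [join_cons x (y :: t'') ht']
      · conv_rhs => rw [List.length_cons, List.range_succ_eq_map, List.map_cons, List.reverse_cons]
        simp [Function.comp_def, join_cons x (y :: t'') ht']

theorem pyRange_one_natCast_succ (m : Nat) :
    PySem.List.pyRange 1 ((m : Int) + 1) 1 = (List.range m).map (fun j => ((j + 1 : Nat) : Int)) := by
  induction m with
  | zero => simp [pysem]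
  | succ m ih =>
    have h1 : (1 : Int) ≤ (m : Int) + 1 := by omega
    rw [show ((m + 1 : Nat) : Int) + 1 = ((m : Int) + 1) + 1 by push_cast; ring,
      PySem.List.pyRange_one_succ_right h1, ih, List.range_succ, List.map_append]
    simp

theorem slice_one_negone {α : Type} (a : α) (t : List α) :
    PySem.List.slice (a :: t) (some 1) (some (-1)) = t.dropLast := by
  simp [PySem.List.slice, PySem.List.clampIdx]
  rw [if_neg (show ¬((t.length : Int) < 0) by omega), List.dropLast_eq_take]

theorem countA_eq_countB (words : List String) (d : PySem.Dict String Int) :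
    (PySem.List.pyRange 1 (words.length) 1).foldl (fun d i =>
        d.insert (PySem.Str.join " " (PySem.List.slice words (some i) none))
          ((d.getD (PySem.Str.join " " (PySem.List.slice words (some i) none)) 0) + 1)) d
    = if 1 < words.length then
        (((PySem.List.slice words (some 1) (some (-1))).reverse.foldl
          (fun (p : String × List String) w => (w ++ " " ++ p.1, p.2 ++ [w ++ " " ++ p.1]))
          ((PySem.List.pyGet? words (-1)).getD "", [(PySem.List.pyGet? words (-1)).getD ""])).2.reverse).foldl
          (fun d s => d.insert s (d.getD s 0 + 1)) d
      else d := by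
  match words with
  | [] => simp [pysem]
  | [a] => simp [pysem]
  | a :: b :: l =>
    rw [if_pos (by simp)]
    have hget : (PySem.List.pyGet? (a :: b :: l) (-1)).getD "" = (b :: l).getLast?.getD "" := by
      simp [pysem, List.getLast?_eq_getElem?]
      rfl
    rw [hget, slice_one_negone, foldB (b :: l) (by simp), List.reverse_reverse,
      show ((a :: b :: l).length : Int) = ((l.length + 1 : Nat) : Int) + 1 by push_cast; simp,
      pyRange_one_natCast_succ, List.foldl_map, List.foldl_map]
    apply PySem.List.foldl_congr_mem
    intro acc j hj
    rw [show PySem.List.slice (a :: b :: l) (some ((j + 1 : Nat) : Int)) none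
          = List.drop j (b :: l) by rw [PySem.List.slice_from_natCast]; rfl]


theorem dominatedB_eq_false (L : List (String × Int)) (kv : String × Int)
    (h : ∀ b ∈ L, PySem.Str.len b.1 ≤ PySem.Str.len kv.1) : dominatedB L kv = false := by
  simp only [dominatedB, List.any_eq_false]
  intro ov hov
  have hle := h ov hov
  simp at hle ⊢
  intro hlt
  exact absurd hlt (by omega)

theorem sweep_mem (L : List (String × Int))
    (hp : L.Pairwise (fun a b => PySem.Str.len b.1 ≤ PySem.Str.len a.1)) :
    ∀ (keep : PySem.Set String) (seen : List (String × Int)) (s : String),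
      (s ∈ (L.foldl (fun (st : PySem.Set String × List (String × Int)) kv =>
          (if decide ((2 : Int) ≤ kv.2) && !dominatedB st.2 kv then PySem.Set.add st.1 kv.1
           else st.1, st.2 ++ [kv])) (keep, seen)).1) ↔
        (s ∈ keep ∨ ∃ kv ∈ L, kv.1 = s ∧ (2:Int) ≤ kv.2 ∧ dominatedB (seen ++ L) kv = false) := by
  induction L with
  | nil => intro keep seen s; simp
  | cons kv rest ih =>
    intro keep seen s
    obtain ⟨hhd, hp'⟩ := List.pairwise_cons.mp hp
    rw [List.foldl_cons, ih hp']
    have h2 : dominatedB (kv :: rest) kv = false := by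
      apply dominatedB_eq_false
      intro b hb
      rcases List.mem_cons.mp hb with h | h
      · exact h ▸ le_refl _
      · exact hhd b h
    have hdom : dominatedB (seen ++ kv :: rest) kv = dominatedB seen kv := by
      simp only [dominatedB, List.any_append] at h2 ⊢
      rw [h2, Bool.or_false]
    simp only [List.append_assoc, List.singleton_append, List.exists_mem_cons_iff]
    by_cases hc : (decide ((2 : Int) ≤ kv.2) && !dominatedB seen kv) = true
    · have hc' : (2 : Int) ≤ kv.2 ∧ dominatedB seen kv = false := by
        simpa [Bool.not_eq_true'] using hc
      rw [if_pos hc]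
      rw [show (s ∈ PySem.Set.add keep kv.1) ↔ (s ∈ keep ∨ s = kv.1) from PySem.Set.mem_add keep kv.1 s]
      rw [hdom]
      constructor
      · rintro ((h | h) | h)
        · exact Or.inl h
        · exact Or.inr (Or.inl ⟨h.symm, hc'.1, hc'.2⟩)
        · exact Or.inr (Or.inr h)
      · rintro (h | ⟨h1, _, _⟩ | h)
        · exact Or.inl (Or.inl h)
        · exact Or.inl (Or.inr h1.symm)
        · exact Or.inr h
    · rw [if_neg hc, hdom]
      have hc' : ¬((2 : Int) ≤ kv.2 ∧ dominatedB seen kv = false) := by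
        intro ⟨ha, hb⟩
        exact hc (by simp [ha, hb])
      constructor
      · rintro (h | h)
        · exact Or.inl h
        · exact Or.inr (Or.inr h)
      · rintro (h | ⟨_, h2', h3'⟩ | h)
        · exact Or.inl h
        · exact absurd ⟨h2', h3'⟩ hc'
        · exact Or.inr h

theorem keep_contains (items : List (String × Int)) (hnd : (items.map Prod.fst).Nodup)
    (p : String × Int) (hp : p ∈ items) :
    PySem.Set.contains
      ((PySem.List.sorted items (fun kv => -(PySem.Str.len kv.1 : Int)) false).foldl
        (fun (st : PySem.Set String × List (String × Int)) kv =>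
          (if decide ((2 : Int) ≤ kv.2) && !dominatedB st.2 kv then PySem.Set.add st.1 kv.1
           else st.1, st.2 ++ [kv])) (PySem.Set.empty, [])).1 p.1
    = (decide ((2:Int) ≤ p.2) && !dominatedB items p) := by
  have hperm := PySem.List.sorted_perm items (fun kv => -(PySem.Str.len kv.1 : Int)) false
  have hpw : (PySem.List.sorted items (fun kv => -(PySem.Str.len kv.1 : Int)) false).Pairwise
      (fun a b => PySem.Str.len b.1 ≤ PySem.Str.len a.1) :=
    (PySem.List.sorted_pairwise items _).imp (by intro a b h; omega)
  have hany : dominatedB (PySem.List.sorted items (fun kv => -(PySem.Str.len kv.1 : Int)) false) p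
      = dominatedB items p := by
    simp only [dominatedB]
    exact hperm.any_eq
  rw [Bool.eq_iff_iff, PySem.Set.contains_iff,
    sweep_mem _ hpw PySem.Set.empty [] p.1]
  simp only [List.nil_append]
  constructor
  · rintro (h | ⟨kv, hkv, h1, h2, h3⟩)
    · exact absurd h (by simp [PySem.Set.empty])
    · have hkv' : kv ∈ items := hperm.mem_iff.mp hkv
      have heq : kv = p := List.inj_on_of_nodup_map hnd hkv' hp h1
      subst heq
      rw [hany] at h3
      simp [h2, h3]
  · intro h
    have h' : (2:Int) ≤ p.2 ∧ dominatedB items p = false := by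
      simpa [Bool.not_eq_true'] using h
    exact Or.inr ⟨p, hperm.mem_iff.mpr hp, rfl, h'.1, by rw [hany]; exact h'.2⟩

theorem nodup_countTagB (tag : String) (d : PySem.Dict String Int) (h : d.keys.Nodup) :
    (countTagB d tag).keys.Nodup := by
  unfold countTagB
  dsimp only
  split
  · exact PySem.Dict.nodup_keys_foldl_insert _ (fun d x => d.getD x 0 + 1) _ h
  · exact h

theorem nodup_cnt (l : List String) : ∀ d : PySem.Dict String Int, d.keys.Nodup →
    (l.foldl countTagB d).keys.Nodup := by
  induction l with
  | nil => intro d h; exact h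
  | cons x l ih => intro d h; exact ih _ (nodup_countTagB x d h)

-- A's inner break-loop deletes s exactly when some item dominates it
theorem innerA_eq (s : String) (sc : Int) (L : List (String × Int)) :
    ∀ d, innerA s sc d L = if dominatedB L (s, sc) then d.erase s else d := by
  induction L with
  | nil => intro d; simp [innerA, dominatedB]
  | cons kv rest ih =>
    intro d
    obtain ⟨o, oc⟩ := kv
    simp only [innerA, dominatedB, List.any_cons, Bool.or_eq_true] at ih ⊢
    by_cases h : (decide (PySem.Str.len s < PySem.Str.len o) && PySem.Str.isIn s o &&
        decide (sc ≤ oc)) = true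
    · rw [if_pos h, if_pos (Or.inl h)]
    · rw [if_neg h, ih d, if_congr (or_iff_right h) rfl rfl]
      rfl

-- folding conditional erases over a list = one filter on the items
theorem items_foldl_erase (f : (String × Int) → Bool) (L : List (String × Int)) :
    ∀ (d : PySem.Dict String Int),
      (L.foldl (fun d kv => if f kv then d.erase kv.1 else d) d).items
        = d.items.filter (fun p => !((L.filter f).map Prod.fst).contains p.1) := by
  induction L with
  | nil => intro d; simp
  | cons kv rest ih =>
    intro d
    simp only [List.foldl_cons]
    by_cases h : f kv = true
    · rw [if_pos h, List.filter_cons_of_pos h, ih]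
      simp only [PySem.Dict.erase, List.filter_filter, List.map_cons, List.contains_cons]
      apply List.filter_congr
      intro p _
      by_cases hp : (p.1 == kv.1) = true <;> simp [hp]
    · rw [if_neg h, List.filter_cons_of_neg h, ih]

theorem common_suffixes_spec_aux (tags : List (String × Int)) :
    common_suffixes tags = common_suffixes_alt tags := by
  unfold common_suffixes common_suffixes_alt
  have hcount : ∀ keys : List String, keys.foldl (fun d tag =>
      let words := (PySem.Str.split? tag " ").getD []
      (PySem.List.pyRange 1 (words.length) 1).foldl (fun d i =>
          let suffix := PySem.Str.join " " (PySem.List.slice words (some i) none)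
          d.insert suffix (d.getD suffix 0 + 1)) d) PySem.Dict.empty
      = keys.foldl countTagB PySem.Dict.empty := by
    intro keys
    apply PySem.List.foldl_congr_mem
    intro acc tag _
    exact (countA_eq_countB _ acc).trans (by simp only [countTagB])
  simp only [hcount]
  set cnt := (PySem.List.dedup (tags.map Prod.fst)).foldl countTagB PySem.Dict.empty with hc
  have hnd : cnt.keys.Nodup := nodup_cnt _ _ (by simp)
  have hstep : ∀ d : PySem.Dict String Int,
      cnt.items.foldl (fun d kv => innerA kv.1 kv.2 d cnt.items) d
        = cnt.items.foldl (fun d kv => if dominatedB cnt.items kv then d.erase kv.1 else d) d := by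
    intro d
    apply PySem.List.foldl_congr_mem
    intro d' kv _
    rw [innerA_eq]
  rw [hstep, items_foldl_erase, List.filter_filter]
  apply List.filter_congr
  intro p hp
  have hmem : ((cnt.items.filter (dominatedB cnt.items)).map Prod.fst).contains p.1
      = dominatedB cnt.items p := by
    by_cases hb : dominatedB cnt.items p = true
    · rw [hb]
      simp only [List.contains_eq_any_beq, List.any_eq_true]
      exact ⟨p.1, List.mem_map_of_mem (List.mem_filter.mpr ⟨hp, hb⟩), by simp⟩
    · rw [Bool.not_eq_true] at hb
      rw [hb]
      refine Bool.eq_false_iff.mpr (fun hc => ?_)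
      simp only [List.contains_eq_any_beq, List.any_eq_true, List.mem_map,
        List.mem_filter, beq_iff_eq] at hc
      obtain ⟨x, ⟨q, ⟨hq, hqb⟩, rfl⟩, hbeq⟩ := hc
      have hqp : q = p := List.inj_on_of_nodup_map hnd hq hp hbeq.symm
      rw [hqp, hb] at hqb
      exact Bool.false_ne_true hqb
  rw [hmem, keep_contains cnt.items hnd p hp]

-- ===== VERDICT (by name: the statement is the Claim_ definition above) =====
theorem common_suffixes_spec : Claim_equal_common_suffixes := by
  intro tags _
  unfold Spec_common_suffixes
  exact common_suffixes_spec_aux tags
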